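-- pv_equiv track=rewrite | github.com/alfred-grubbrr/Upsell_ML | generate_data_azure.py | recommend_product
-- ===== SOURCE A (Python) =====
-- import heapq
--
-- def recommend_product(not_order_item, item_price):
--     heap = []
--     for item in not_order_item:
--         heapq.heappush(heap, (item_price[item], item))
--         if len(heap) > 1:
--             heapq.heappop(heap)
--     item = heapq.heappop(heap)
--     return item[1]
-- ===== SOURCE B (Python) =====
-- def recommend_product(not_order_item, item_price):
--     best_price = max(item_price[item] for item in not_order_item)
--     return max(item for item in not_order_item if item_price[item] == best_price)
-- ===== Notes on version B (the rewrite author's own statement) =====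
-- stated objective: alternative
-- what changed: Replaces A's one-pass bounded heap of (price, item) tuples with two staged passes: first compute the maximum price, then take the maximum item name among the items carrying that price.
import Mathlib
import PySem

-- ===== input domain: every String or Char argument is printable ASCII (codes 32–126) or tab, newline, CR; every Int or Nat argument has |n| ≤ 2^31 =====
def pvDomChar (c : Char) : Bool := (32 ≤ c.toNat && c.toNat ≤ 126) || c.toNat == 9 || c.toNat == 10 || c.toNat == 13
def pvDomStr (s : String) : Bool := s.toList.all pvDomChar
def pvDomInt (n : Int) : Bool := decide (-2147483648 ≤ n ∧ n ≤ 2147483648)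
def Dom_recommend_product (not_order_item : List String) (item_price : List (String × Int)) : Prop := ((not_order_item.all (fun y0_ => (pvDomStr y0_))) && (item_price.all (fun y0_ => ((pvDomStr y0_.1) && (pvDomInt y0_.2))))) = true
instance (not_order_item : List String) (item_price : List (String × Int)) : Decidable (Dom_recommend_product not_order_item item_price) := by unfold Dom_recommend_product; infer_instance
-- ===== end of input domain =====

-- B replaces A's one-pass bounded heap by two staged passes: first the maximum price,
-- then the maximum item name among the items carrying that price (alternative decomposition).
-- Both raise on empty not_order_item / missing key; Pre_ excludes exactly those.

-- Python `<` on (int, str) tuples (ints and strings compare as Lean's Int/String orders)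
def pvPairLt (x y : Int × String) : Bool :=
  decide (x.1 < y.1) || (decide (x.1 = y.1) && decide (x.2 < y.2))

-- ===== PORT A =====
-- heapq.heappush on a heap kept as a sorted list (exact for the size-≤2 heaps A builds)
def pvHeappush (heap : List (Int × String)) (x : Int × String) : List (Int × String) :=
  match heap with
  | [] => [x]
  | h :: t => if pvPairLt x h then x :: h :: t else h :: pvHeappush t x

def recommend_product (not_order_item : List String) (item_price : List (String × Int)) : String :=
  let heap := not_order_item.foldl (fun heap item =>
    -- item_price[item]: KeyError (excluded by Pre_) is mapped to a default 0
    let heap := pvHeappush heap ((PySem.Dict.mk item_price).getD item 0, item)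
    if heap.length > 1 then heap.tail else heap) []
  match heap with
  | [] => ""        -- heappop from empty heap: IndexError, excluded by Pre_
  | x :: _ => x.2

-- ===== PORT B =====
def recommend_product_alt (not_order_item : List String) (item_price : List (String × Int)) : String :=
  let d := PySem.Dict.mk item_price
  -- best_price = max(item_price[item] for item in not_order_item)
  match PySem.List.max? (not_order_item.map (fun item => d.getD item 0)) (fun p => p) with
  | none => ""      -- max() of an empty iterable: ValueError, excluded by Pre_
  | some best_price =>
    -- max(item for item in not_order_item if item_price[item] == best_price)
    match PySem.List.max? (not_order_item.filter (fun item => decide (d.getD item 0 = best_price))) (fun s => s) with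
    | none => ""    -- unreachable: the maximal price is attained
    | some item => item

-- ===== PRECONDITION & SPEC =====
-- Both programs raise on an empty not_order_item (IndexError in A, ValueError in B)
-- and on an item missing from item_price (KeyError in both); excluded.
def Pre_recommend_product (not_order_item : List String) (item_price : List (String × Int)) : Prop :=
  not_order_item ≠ [] ∧ ∀ s ∈ not_order_item, ((PySem.Dict.mk item_price).get? s).isSome

instance (not_order_item : List String) (item_price : List (String × Int)) : Decidable (Pre_recommend_product not_order_item item_price) := by unfold Pre_recommend_product; infer_instance

def pvWitness_recommend_product : List String × (List (String × Int)) := (["a", "b"], [("a", 3), ("b", 2)])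

def Spec_recommend_product (not_order_item : List String) (item_price : List (String × Int)) (out : String) : Prop := out = recommend_product_alt not_order_item item_price
instance (not_order_item : List String) (item_price : List (String × Int)) (out : String) : Decidable (Spec_recommend_product not_order_item item_price out) := by unfold Spec_recommend_product; infer_instance

-- ===== CLAIM (what is proved, stated in full; the proofs are below) =====
def Claim_equal_recommend_product : Prop := ∀ (not_order_item : List String) (item_price : List (String × Int)), Dom_recommend_product not_order_item item_price → Pre_recommend_product not_order_item item_price → Spec_recommend_product not_order_item item_price (recommend_product not_order_item item_price)

-- ===== LEMMAS AND PROOFS =====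

lemma pvPairLt_iff (x y : Int × String) : pvPairLt x y = true ↔ toLex x < toLex y := by
  simp [pvPairLt, Prod.Lex.lt_iff]

lemma pvPairLt_eq_lex (x y : Int × String) :
    pvPairLt x y = decide (toLex x < toLex y) := by
  rw [Bool.eq_iff_iff]
  simp [pvPairLt_iff]

lemma pvPairLt_asymm (x y : Int × String) (h : pvPairLt x y = true) : pvPairLt y x = false := by
  rw [pvPairLt_iff] at h
  rw [pvPairLt_eq_lex]
  simpa using lt_asymm h

lemma pvPairLt_conn (x y : Int × String) (h1 : pvPairLt x y = false) (h2 : pvPairLt y x = false) : x = y := by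
  rw [pvPairLt_eq_lex] at h1 h2
  simp only [decide_eq_false_iff_not, not_lt] at h1 h2
  exact toLex.injective (le_antisymm h2 h1)

-- A's one step on a singleton heap keeps the larger tuple
lemma stepA_singleton (b x : Int × String) :
    (let h := pvHeappush [b] x; if h.length > 1 then h.tail else h)
      = [if pvPairLt b x then x else b] := by
  simp only [pvHeappush]
  by_cases h : pvPairLt x b = true
  · simp [h, pvPairLt_asymm _ _ h]
  · simp only [Bool.not_eq_true] at h
    by_cases h' : pvPairLt b x = true
    · simp [h, h']
    · simp only [Bool.not_eq_true] at h'
      have := pvPairLt_conn _ _ h' h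
      simp [this]

-- A's heap fold started from a singleton IS the running lexicographic maximum
lemma fold_agree (l : List String) (item_price : List (String × Int)) (b : Int × String) :
    l.foldl (fun heap item =>
      if (pvHeappush heap ((PySem.Dict.mk item_price).getD item 0, item)).length > 1
      then (pvHeappush heap ((PySem.Dict.mk item_price).getD item 0, item)).tail
      else pvHeappush heap ((PySem.Dict.mk item_price).getD item 0, item)) [b]
    = [(l.foldl (fun best item =>
        if pvPairLt best ((PySem.Dict.mk item_price).getD item 0, item)
        then ((PySem.Dict.mk item_price).getD item 0, item) else best) b)] := by
  induction l generalizing b with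
  | nil => rfl
  | cons x xs ih =>
    simp only [List.foldl_cons]
    have := stepA_singleton b ((PySem.Dict.mk item_price).getD x 0, x)
    simp only at this
    rw [this]
    exact ih _

-- the running lexicographic maximum is foldl max over the Lex order
lemma foldf_eq_lex_max (l : List String) (item_price : List (String × Int)) (b : Int × String) :
    toLex (l.foldl (fun best item =>
        if pvPairLt best ((PySem.Dict.mk item_price).getD item 0, item)
        then ((PySem.Dict.mk item_price).getD item 0, item) else best) b)
    = (l.map (fun item => toLex (((PySem.Dict.mk item_price).getD item 0 : Int), item))).foldl max (toLex b) := by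
  induction l generalizing b with
  | nil => rfl
  | cons x xs ih =>
    simp only [List.foldl_cons, List.map_cons]
    rw [ih]
    congr 1
    rw [pvPairLt_eq_lex]
    by_cases h : toLex b < toLex (((PySem.Dict.mk item_price).getD x 0 : Int), x)
    · simp [h, max_eq_right h.le]
    · simp [h, max_eq_left (not_lt.mp h)]

-- ===== VERDICT (by name: the statement is the Claim_ definition above) =====
theorem recommend_product_spec : Claim_equal_recommend_product := by
  intro not_order_item item_price _ hpre
  obtain ⟨hne, _⟩ := hpre
  cases not_order_item with
  | nil => exact absurd rfl hne
  | cons x xs =>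
    unfold Spec_recommend_product recommend_product recommend_product_alt
    simp only [List.foldl_cons, pvHeappush, List.length_cons, List.length_nil,
      Nat.lt_irrefl, gt_iff_lt, if_false]
    rw [fold_agree]
    -- A's value: second component of the Lex maximum M
    have hA := foldf_eq_lex_max xs item_price ((PySem.Dict.mk item_price).getD x 0, x)
    set M : Lex (Int × String) :=
      (xs.map (fun item => toLex (((PySem.Dict.mk item_price).getD item 0 : Int), item))).foldl max
        (toLex ((PySem.Dict.mk item_price).getD x 0, x)) with hM
    -- M is attained and is an upper bound
    have hMub : ∀ y ∈ x :: xs, toLex (((PySem.Dict.mk item_price).getD y 0 : Int), y) ≤ M := by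
      intro y hy
      rcases List.mem_cons.mp hy with rfl | hy'
      · exact (PySem.List.le_foldl_max _ _).1
      · exact (PySem.List.le_foldl_max _ _).2 _
          (List.mem_map.mpr ⟨y, hy', rfl⟩)
    have hMmem : ∃ m ∈ x :: xs, M = toLex (((PySem.Dict.mk item_price).getD m 0 : Int), m) := by
      rcases PySem.List.foldl_max_mem
        (xs.map (fun item => toLex (((PySem.Dict.mk item_price).getD item 0 : Int), item)))
        (toLex ((PySem.Dict.mk item_price).getD x 0, x)) with h | h
      · exact ⟨x, List.mem_cons_self .., by rw [hM, h]⟩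
      · rcases List.mem_map.mp (hM ▸ h) with ⟨m, hm, hmeq⟩
        exact ⟨m, List.mem_cons_of_mem _ hm, (hM ▸ hmeq).symm⟩
    -- B's first pass: the maximal price exists
    obtain ⟨bp, hbp⟩ : ∃ bp, PySem.List.max?
        ((x :: xs).map (fun item => (PySem.Dict.mk item_price).getD item 0)) (fun q => q) = some bp := by
      cases hmx : PySem.List.max? ((x :: xs).map (fun item => (PySem.Dict.mk item_price).getD item 0)) (fun q => q) with
      | none => exact absurd ((PySem.List.max?_eq_none_iff _ _).mp hmx) (by simp)
      | some bp => exact ⟨bp, rfl⟩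
    have hbp_ub : ∀ y ∈ x :: xs, (PySem.Dict.mk item_price).getD y 0 ≤ bp := fun y hy =>
      PySem.List.max?_isMax hbp _ (List.mem_map.mpr ⟨y, hy, rfl⟩)
    have hbp_mem : ∃ y ∈ x :: xs, (PySem.Dict.mk item_price).getD y 0 = bp := by
      rcases List.mem_map.mp (PySem.List.max?_mem hbp) with ⟨y, hy, hyq⟩
      exact ⟨y, hy, hyq⟩
    -- B's second pass: the filtered list is nonempty, take its maximum
    have hfilter_ne : (x :: xs).filter (fun item => decide ((PySem.Dict.mk item_price).getD item 0 = bp)) ≠ [] := by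
      rcases hbp_mem with ⟨y, hy, hyq⟩
      intro hcontra
      have : y ∈ (x :: xs).filter (fun item => decide ((PySem.Dict.mk item_price).getD item 0 = bp)) :=
        List.mem_filter.mpr ⟨hy, by simp [hyq]⟩
      rw [hcontra] at this; exact absurd this (List.not_mem_nil)
    obtain ⟨it, hit⟩ : ∃ it, PySem.List.max?
        ((x :: xs).filter (fun item => decide ((PySem.Dict.mk item_price).getD item 0 = bp))) (fun s => s) = some it := by
      cases hmx : PySem.List.max? ((x :: xs).filter (fun item => decide ((PySem.Dict.mk item_price).getD item 0 = bp))) (fun s => s) with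
      | none => exact absurd ((PySem.List.max?_eq_none_iff _ _).mp hmx) hfilter_ne
      | some it => exact ⟨it, rfl⟩
    have hit_mem := PySem.List.max?_mem hit
    have hit_in : it ∈ x :: xs := List.mem_of_mem_filter hit_mem
    have hit_price : (PySem.Dict.mk item_price).getD it 0 = bp := by
      have := (List.mem_filter.mp hit_mem).2
      simpa using this
    have hit_ub : ∀ y ∈ x :: xs, (PySem.Dict.mk item_price).getD y 0 = bp → y ≤ it := by
      intro y hy hyq
      exact PySem.List.max?_isMax hit _ (List.mem_filter.mpr ⟨hy, by simp [hyq]⟩)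
    -- the pair (bp, it) is an upper bound in the Lex order, hence equals M
    have hpair_ub : ∀ y ∈ x :: xs, toLex (((PySem.Dict.mk item_price).getD y 0 : Int), y) ≤ toLex ((bp : Int), it) := by
      intro y hy
      rw [Prod.Lex.le_iff]
      rcases lt_or_eq_of_le (hbp_ub y hy) with h | h
      · exact Or.inl h
      · exact Or.inr ⟨h, hit_ub y hy h⟩
    have hMeq : M = toLex ((bp : Int), it) := by
      rcases hMmem with ⟨m, hm, hmeq⟩
      refine le_antisymm (hmeq ▸ hpair_ub m hm) ?_
      have := hMub it hit_in
      rwa [hit_price] at this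
    have hA' : (xs.foldl (fun best item =>
        if pvPairLt best ((PySem.Dict.mk item_price).getD item 0, item)
        then ((PySem.Dict.mk item_price).getD item 0, item) else best)
        ((PySem.Dict.mk item_price).getD x 0, x)) = ofLex M := congrArg ofLex hA
    rw [hA', hMeq, hbp]
    simp [hit]

-- ===== end =====
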